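-- pv_equiv track=rewrite | github.com/cosmelab/dna-barcoding-analysis | modules/02_consensus/create_consensus.py | trim_sequence_ends
-- ===== SOURCE A (Python) =====
-- def trim_sequence_ends(seq_str, min_quality_window=20):
--     """
--     Trim N bases and low-quality regions from sequence ends
--
--     Removes:
--     - N bases from start and end
--     - Ambiguous bases (non-ACGT) from ends
--
--     This dramatically speeds up alignment and improves consensus quality
--
--     Args:
--         seq_str: DNA sequence string
--         min_quality_window: minimum window size to keep (default 20bp)
--
--     Returns:
--         str: Trimmed sequence
--     """
--     seq = seq_str.upper()
--
--     # Trim from start - remove N's and non-ACGT bases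
--     start = 0
--     while start < len(seq) and seq[start] not in 'ACGT':
--         start += 1
--
--     # Trim from end - remove N's and non-ACGT bases
--     end = len(seq)
--     while end > start and seq[end-1] not in 'ACGT':
--         end -= 1
--
--     trimmed = seq[start:end]
--
--     # Keep at least min_quality_window bp, otherwise return empty
--     if len(trimmed) < min_quality_window:
--         return ""
--
--     return trimmed
-- ===== SOURCE B (Python) =====
-- def trim_sequence_ends(seq_str, min_quality_window=20):
--     """Trim non-ACGT bases from both ends: one forward pass records the
--     indices of valid bases, then a single slice takes the span between the
--     first and last valid index (inclusive)."""
--     seq = seq_str.upper()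
--     valid = [i for i, c in enumerate(seq) if c in 'ACGT']
--     trimmed = '' if not valid else seq[valid[0]:valid[-1] + 1]
--     return '' if len(trimmed) < min_quality_window else trimmed
-- ===== Notes on version B (the rewrite author's own statement) =====
-- stated objective: alternative
-- what changed: Replaces the two inward-scanning while-loops over indices with a single forward pass that records the indices of valid bases and one direct slice seq[first:last+1].
import Mathlib
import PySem

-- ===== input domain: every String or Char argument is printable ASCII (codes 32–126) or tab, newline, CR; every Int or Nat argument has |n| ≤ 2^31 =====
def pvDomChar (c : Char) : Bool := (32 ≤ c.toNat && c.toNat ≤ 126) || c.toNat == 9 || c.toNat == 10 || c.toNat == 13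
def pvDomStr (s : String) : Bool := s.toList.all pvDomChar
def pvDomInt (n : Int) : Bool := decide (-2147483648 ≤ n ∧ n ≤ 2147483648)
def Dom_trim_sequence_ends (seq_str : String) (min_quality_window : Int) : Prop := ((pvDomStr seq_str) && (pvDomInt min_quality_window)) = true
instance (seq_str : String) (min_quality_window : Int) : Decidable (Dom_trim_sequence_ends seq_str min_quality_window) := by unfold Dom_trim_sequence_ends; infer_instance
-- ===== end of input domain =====

-- B replaces A's two inward-scanning while-loops by one forward pass that records
-- the indices of valid bases and a single slice seq[first:last+1] (alternative decomposition, same cost).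

-- `c not in 'ACGT'` / `c in 'ACGT'` for a single character c is exactly character membership.
def isACGT (c : Char) : Bool := c == 'A' || c == 'C' || c == 'G' || c == 'T'

-- ===== PORT A =====
-- `while start < len(seq) and seq[start] not in 'ACGT': start += 1`
-- (the guard keeps the index in range, so getD never falls back to its default)
def trimStartA (l : List Char) (start : Nat) : Nat :=
  if h : start < l.length ∧ ¬ isACGT (l.getD start 'A') then trimStartA l (start + 1) else start
termination_by l.length - start
decreasing_by omega

-- `while end > start and seq[end-1] not in 'ACGT': end -= 1`
def trimEndA (l : List Char) (start e : Nat) : Nat :=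
  if h : start < e ∧ ¬ isACGT (l.getD (e - 1) 'A') then trimEndA l start (e - 1) else e
termination_by e
decreasing_by omega

def trim_sequence_ends (seq_str : String) (min_quality_window : Int) : String :=
  let seq := PySem.Chars.upper seq_str.toList
  let start := trimStartA seq 0
  let e := trimEndA seq start seq.length
  let trimmed := PySem.List.slice seq (some (start : Int)) (some (e : Int))
  if (trimmed.length : Int) < min_quality_window then "" else String.mk trimmed

-- ===== PORT B =====
-- `valid = [i for i, c in enumerate(seq) if c in 'ACGT']`
def validOf (l : List Char) : List Int :=
  (PySem.List.enumerate l).filterMap (fun p => if isACGT p.2 then some p.1 else none)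

-- `'' if not valid else seq[valid[0]:valid[-1] + 1]` — valid[0] / valid[-1] are read under the
-- non-empty guard, so headD / getLastD never fall back to their defaults.
def trim_sequence_ends_alt (seq_str : String) (min_quality_window : Int) : String :=
  let seq := PySem.Chars.upper seq_str.toList
  let valid := validOf seq
  let trimmed : List Char :=
    if valid.isEmpty then []
    else PySem.List.slice seq (some (valid.headD 0)) (some (valid.getLastD 0 + 1))
  if (trimmed.length : Int) < min_quality_window then "" else String.mk trimmed

-- ===== PRECONDITION & SPEC =====
def Spec_trim_sequence_ends (seq_str : String) (min_quality_window : Int) (out : String) : Prop := out = trim_sequence_ends_alt seq_str min_quality_window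
instance (seq_str : String) (min_quality_window : Int) (out : String) : Decidable (Spec_trim_sequence_ends seq_str min_quality_window out) := by unfold Spec_trim_sequence_ends; infer_instance

-- ===== CLAIM (what is proved, stated in full; the proofs are below) =====
def Claim_equal_trim_sequence_ends : Prop := ∀ (seq_str : String) (min_quality_window : Int), Dom_trim_sequence_ends seq_str min_quality_window → Spec_trim_sequence_ends seq_str min_quality_window (trim_sequence_ends seq_str min_quality_window)

-- ===== LEMMAS AND PROOFS =====

theorem mem_validOf (l : List Char) (x : Int) :
    x ∈ validOf l ↔ ∃ k : Nat, k < l.length ∧ x = (k : Int) ∧ isACGT (l.getD k 'A') = true := by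
  simp only [validOf, List.mem_filterMap, PySem.List.mem_enumerate_iff]
  constructor
  · rintro ⟨p, ⟨k, hk, hp⟩, hf⟩
    subst hp
    by_cases hvv : isACGT (l[k]) = true
    · refine ⟨k, hk, ?_, ?_⟩
      · simp [hvv] at hf; omega
      · rw [List.getD_eq_getElem l 'A' hk]; exact hvv
    · simp [hvv] at hf
  · rintro ⟨k, hk, rfl, hvv⟩
    rw [List.getD_eq_getElem l 'A' hk] at hvv
    exact ⟨(0 + (k : Int), l[k]), ⟨k, hk, rfl⟩, by simp [hvv]⟩

theorem pairwise_validOf (l : List Char) : (validOf l).Pairwise (· < ·) := by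
  have h := PySem.List.pairwise_lt_enumerate (xs := l) (s := 0)
  refine List.Pairwise.filterMap _ ?_ ‹_›
  intro a b hab x hx y hy
  split at hx <;> split at hy <;> simp_all

theorem le_getLast_of_pairwise_lt (l : List Int) (h : l.Pairwise (· < ·)) (hne : l ≠ [])
    (x : Int) (hx : x ∈ l) : x ≤ l.getLast hne := by
  induction l with
  | nil => cases hx
  | cons a t ih =>
    rcases List.mem_cons.1 hx with rfl | hx'
    · cases t with
      | nil => simp
      | cons b u =>
        rw [List.getLast_cons (List.cons_ne_nil b u)]
        exact le_of_lt (List.rel_of_pairwise_cons h (List.getLast_mem _))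
    · have ht : t ≠ [] := List.ne_nil_of_mem hx'
      rw [List.getLast_cons ht]
      exact ih (List.Pairwise.of_cons h) ht hx'

theorem trimStartA_eq_of (l : List Char) (i : Nat) (hi : i ≤ l.length)
    (hinv : ∀ k, k < i → isACGT (l.getD k 'A') = false)
    (hstop : i = l.length ∨ isACGT (l.getD i 'A') = true) :
    ∀ s, s ≤ i → trimStartA l s = i := by
  intro s hs
  induction hd : i - s generalizing s with
  | zero =>
    have hsi : s = i := by omega
    subst hsi
    rw [trimStartA]
    rcases hstop with h | h
    · exact dif_neg (fun hc => absurd hc.1 (by omega))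
    · exact dif_neg (fun hc => hc.2 h)
  | succ n ih =>
    have hsl : s < l.length := by omega
    have hbad := hinv s (by omega)
    rw [trimStartA, dif_pos ⟨hsl, by simp only [Bool.not_eq_true]; exact hbad⟩]
    exact ih (s + 1) (by omega) (by omega)

theorem trimEndA_eq_of (l : List Char) (start j : Nat) (hj : j < l.length)
    (hv : isACGT (l.getD j 'A') = true) (hstart : start ≤ j)
    (hinv : ∀ k, j < k → k < l.length → isACGT (l.getD k 'A') = false) :
    ∀ e, j < e → e ≤ l.length → trimEndA l start e = j + 1 := by
  intro e he hel
  induction hd : e - (j + 1) generalizing e with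
  | zero =>
    have hej : e = j + 1 := by omega
    subst hej
    rw [trimEndA]
    exact dif_neg (fun hc => hc.2 hv)
  | succ n ih =>
    have hbad := hinv (e - 1) (by omega) (by omega)
    rw [trimEndA, dif_pos ⟨by omega, by simp only [Bool.not_eq_true]; exact hbad⟩]
    exact ih (e - 1) (by omega) (by omega) (by omega)

theorem trimmed_eq (l : List Char) :
    PySem.List.slice l (some ((trimStartA l 0 : Nat) : Int)) (some ((trimEndA l (trimStartA l 0) l.length : Nat) : Int)) =
      (if (validOf l).isEmpty then ([] : List Char)
       else PySem.List.slice l (some ((validOf l).headD 0)) (some ((validOf l).getLastD 0 + 1))) := by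
  rcases hv : validOf l with _ | ⟨i, rest⟩
  · -- no valid base anywhere: both scans cross the whole string, the slice is empty
    have hall : ∀ k, k < l.length → isACGT (l.getD k 'A') = false := by
      intro k hk
      by_contra hbad
      have : (k : Int) ∈ validOf l := (mem_validOf l k).2 ⟨k, hk, rfl, by simpa using hbad⟩
      rw [hv] at this; cases this
    have hstart : trimStartA l 0 = l.length :=
      trimStartA_eq_of l l.length le_rfl (fun k hk => hall k hk) (Or.inl rfl) 0 (Nat.zero_le _)
    have hend : trimEndA l l.length l.length = l.length := by
      rw [trimEndA]
      exact dif_neg (fun hc => absurd hc.1 (by omega))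
    rw [hstart, hend, PySem.List.slice_natCast]
    simp
  · -- first and last valid index
    have hmemi : i ∈ validOf l := by rw [hv]; exact List.mem_cons_self ..
    obtain ⟨iN, hiN, hieq, hiv⟩ := (mem_validOf l i).1 hmemi
    have hL : (i :: rest).getLastD 0 = (i :: rest).getLast (List.cons_ne_nil i rest) := by
      simp [List.getLastD_eq_getLast?, List.getLast?_eq_some_getLast (List.cons_ne_nil i rest)]
    have hmemj : (i :: rest).getLast (List.cons_ne_nil i rest) ∈ validOf l := by
      rw [hv]; exact List.getLast_mem _
    obtain ⟨jN, hjN, hjeq, hjv⟩ := (mem_validOf l _).1 hmemj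
    have hpw : (validOf l).Pairwise (· < ·) := pairwise_validOf l
    have hpw' : (i :: rest).Pairwise (· < ·) := by rw [hv] at hpw; exact hpw
    -- every valid index x satisfies i ≤ x ≤ last
    have hmin : ∀ x ∈ validOf l, i ≤ x := by
      intro x hx
      rw [hv] at hx
      rcases List.mem_cons.1 hx with rfl | hx'
      · exact le_rfl
      · exact le_of_lt (List.rel_of_pairwise_cons hpw' hx')
    have hmax : ∀ x ∈ validOf l, x ≤ (i :: rest).getLast (List.cons_ne_nil i rest) := by
      intro x hx
      rw [hv] at hx
      exact le_getLast_of_pairwise_lt _ hpw' (List.cons_ne_nil i rest) x hx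
    have hij : iN ≤ jN := by
      have := hmax i hmemi
      omega
    have hminN : ∀ k, k < iN → isACGT (l.getD k 'A') = false := by
      intro k hk
      by_contra hbad
      have hmem : (k : Int) ∈ validOf l :=
        (mem_validOf l k).2 ⟨k, by omega, rfl, by simpa using hbad⟩
      have := hmin _ hmem
      omega
    have hmaxN : ∀ k, jN < k → k < l.length → isACGT (l.getD k 'A') = false := by
      intro k hk hkl
      by_contra hbad
      have hmem : (k : Int) ∈ validOf l :=
        (mem_validOf l k).2 ⟨k, hkl, rfl, by simpa using hbad⟩
      have := hmax _ hmem
      omega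
    have hstart : trimStartA l 0 = iN :=
      trimStartA_eq_of l iN (by omega) hminN (Or.inr hiv) 0 (Nat.zero_le _)
    have hend : trimEndA l iN l.length = jN + 1 :=
      trimEndA_eq_of l iN jN hjN hjv hij hmaxN l.length (by omega) le_rfl
    rw [hstart, hend, if_neg (by simp), List.headD_cons, hL, hjeq, hieq]
    push_cast
    rfl

theorem gate_congr (t1 t2 : List Char) (m : Int) (h : t1 = t2) :
    (if (t1.length : Int) < m then "" else String.mk t1)
      = (if (t2.length : Int) < m then "" else String.mk t2) := by rw [h]

-- ===== VERDICT (by name: the statement is the Claim_ definition above) =====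
theorem trim_sequence_ends_spec : Claim_equal_trim_sequence_ends := by
  intro seq_str min_quality_window _
  exact gate_congr _ _ min_quality_window (trimmed_eq (PySem.Chars.upper seq_str.toList))
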